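-- pv_equiv track=rewrite | github.com/AryanKadar/voice-assistant- | data_tdd.py | call_help1
-- ===== SOURCE A (Python) =====
-- def call_help1(l):
-- 	ik=[]
-- 	kk=""
-- 	for i in range(0,len(l)):
-- 		if l[i]!=":":
-- 			kk=kk+l[i]
--
-- 		if  l[i]==":" or i==len(l)-4 :
-- 			ik.append(kk)
-- 			kk=""
-- 	return ik
-- ===== SOURCE B (Python) =====
-- def call_help1(l):
--     n = len(l)
--     bs = [i for i in range(n) if l[i] == ":" or i == n - 4]
--     out = []
--     start = 0
--     for i in bs:
--         if l[i] == ":":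
--             out.append(l[start:i])
--         else:
--             out.append(l[start:i + 1])
--         start = i + 1
--     return out
-- ===== Notes on version B (the rewrite author's own statement) =====
-- stated objective: alternative
-- what changed: Replaces the char-by-char accumulator loop with a two-phase decomposition: first collect the boundary indices (colons and index len(l)-4), then emit each field as a slice between a running start pointer and the boundary (colon excluded, the len-4 char included).
import Mathlib
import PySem

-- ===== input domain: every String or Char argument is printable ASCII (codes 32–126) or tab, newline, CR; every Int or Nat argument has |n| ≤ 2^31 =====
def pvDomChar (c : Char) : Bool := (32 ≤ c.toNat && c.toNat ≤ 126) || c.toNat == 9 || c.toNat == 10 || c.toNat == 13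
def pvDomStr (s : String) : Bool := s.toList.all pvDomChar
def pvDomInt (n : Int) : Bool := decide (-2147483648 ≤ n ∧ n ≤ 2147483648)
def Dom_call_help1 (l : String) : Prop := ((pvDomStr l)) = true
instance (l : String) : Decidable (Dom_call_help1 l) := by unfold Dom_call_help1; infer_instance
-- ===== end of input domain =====

-- B replaces A's single char-accumulation loop by a boundary-index pass plus slice
-- extraction (alternative decomposition, same cost); the return values agree on all inputs.

-- ===== PORT A =====
-- A's loop state: ik as List (List Char) and the accumulator kk as List Char
-- (PySem convention: Python str facts are proved on the List Char side); the
-- collected fields are turned into String at the very end.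
def aStep (cs : List Char) (n : Int) (st : List (List Char) × List Char) (i : Int) :
    List (List Char) × List Char :=
  let c := PySem.List.pyGetD cs i ' '
  let kk := if c ≠ ':' then st.2 ++ [c] else st.2
  if c = ':' ∨ i = n - 4 then (st.1 ++ [kk], []) else (st.1, kk)
def call_help1 (l : String) : List String :=
  let cs := l.toList
  let r := (PySem.List.pyRange 0 (cs.length : Int) 1).foldl (aStep cs (cs.length : Int)) ([], [])
  r.1.map (fun kk => String.ofList kk)

-- ===== PORT B =====
def bBoundary (cs : List Char) (n : Int) (i : Int) : Bool :=
  decide (PySem.List.pyGetD cs i ' ' = ':') || decide (i = n - 4)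

def bStep (cs : List Char) (st : List (List Char) × Int) (i : Int) :
    List (List Char) × Int :=
  if PySem.List.pyGetD cs i ' ' = ':' then
    (st.1 ++ [PySem.List.slice cs (some st.2) (some i)], i + 1)
  else
    (st.1 ++ [PySem.List.slice cs (some st.2) (some (i + 1))], i + 1)

def call_help1_alt (l : String) : List String :=
  let cs := l.toList
  let n : Int := cs.length
  let bs := (PySem.List.pyRange 0 n 1).filter (bBoundary cs n)
  ((bs.foldl (bStep cs) ([], 0)).1).map (fun kk => String.ofList kk)

-- ===== PRECONDITION & SPEC =====
def Spec_call_help1 (l : String) (out : List String) : Prop := out = call_help1_alt l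
instance (l : String) (out : List String) : Decidable (Spec_call_help1 l out) := by unfold Spec_call_help1; infer_instance

-- ===== CLAIM (what is proved, stated in full; the proofs are below) =====
def Claim_equal_call_help1 : Prop := ∀ (l : String), Dom_call_help1 l → Spec_call_help1 l (call_help1 l)

-- ===== LEMMAS AND PROOFS =====

lemma slice_snoc (cs : List Char) (s j : Int) (h0 : 0 ≤ s) (hsj : s ≤ j)
    (hj : j < (cs.length : Int)) :
    PySem.List.slice cs (some s) (some (j + 1)) =
      PySem.List.slice cs (some s) (some j) ++ [PySem.List.pyGetD cs j ' '] := by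
  rw [PySem.List.slice_toNat cs h0 (by omega), PySem.List.slice_toNat cs h0 (by omega),
      PySem.List.pyGetD_eq_getElem cs ' ' (by omega) hj]
  have h1 : (j + 1).toNat = j.toNat + 1 := by omega
  have h2 : j.toNat + 1 - s.toNat = (j.toNat - s.toNat) + 1 := by omega
  rw [h1, h2, List.take_add_one]
  have h3 : (cs.drop s.toNat)[j.toNat - s.toNat]? = some cs[j.toNat] := by
    rw [List.getElem?_drop]
    have h4 : s.toNat + (j.toNat - s.toNat) = j.toNat := by omega
    rw [h4, List.getElem?_eq_getElem]
  rw [h3]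
  rfl

lemma slice_empty (cs : List Char) (j : Int) (h : 0 ≤ j) :
    PySem.List.slice cs (some j) (some j) = ([] : List Char) := by
  rw [PySem.List.slice_toNat cs h h]
  simp


lemma aStep_colon (cs : List Char) (n : Int) (st : List (List Char) × List Char) (i : Int)
    (hc : PySem.List.pyGetD cs i ' ' = ':') : aStep cs n st i = (st.1 ++ [st.2], []) := by
  simp [aStep, hc]

lemma aStep_last (cs : List Char) (n : Int) (st : List (List Char) × List Char) (i : Int)
    (hc : PySem.List.pyGetD cs i ' ' ≠ ':') (hb : i = n - 4) :
    aStep cs n st i = (st.1 ++ [st.2 ++ [PySem.List.pyGetD cs i ' ']], []) := by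
  subst hb
  simp [aStep, hc]

lemma aStep_mid (cs : List Char) (n : Int) (st : List (List Char) × List Char) (i : Int)
    (hc : PySem.List.pyGetD cs i ' ' ≠ ':') (hb : i ≠ n - 4) :
    aStep cs n st i = (st.1, st.2 ++ [PySem.List.pyGetD cs i ' ']) := by
  simp [aStep, hc, hb]

lemma bStep_colon (cs : List Char) (st : List (List Char) × Int) (i : Int)
    (hc : PySem.List.pyGetD cs i ' ' = ':') :
    bStep cs st i = (st.1 ++ [PySem.List.slice cs (some st.2) (some i)], i + 1) := by
  simp [bStep, hc]

lemma bStep_last (cs : List Char) (st : List (List Char) × Int) (i : Int)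
    (hc : PySem.List.pyGetD cs i ' ' ≠ ':') :
    bStep cs st i = (st.1 ++ [PySem.List.slice cs (some st.2) (some (i + 1))], i + 1) := by
  simp [bStep, hc]

lemma bBoundary_true (cs : List Char) (n : Int) (i : Int)
    (h : PySem.List.pyGetD cs i ' ' = ':' ∨ i = n - 4) : bBoundary cs n i = true := by
  rcases h with h | h <;> simp [bBoundary, h]

lemma bBoundary_false (cs : List Char) (n : Int) (i : Int)
    (hc : PySem.List.pyGetD cs i ' ' ≠ ':') (hb : i ≠ n - 4) : bBoundary cs n i = false := by
  simp [bBoundary, hc, hb]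

lemma main_inv (cs : List Char) : ∀ d : Nat, ∀ j : Int, 0 ≤ j → j ≤ (cs.length : Int) →
    (((cs.length : Int) - j).toNat = d) →
    ∀ (start : Int) (ik : List (List Char)), 0 ≤ start → start ≤ j →
    (∀ k : Int, start ≤ k → k < j → PySem.List.pyGetD cs k ' ' ≠ ':') →
    ((PySem.List.pyRange j (cs.length : Int) 1).foldl (aStep cs (cs.length : Int))
        (ik, PySem.List.slice cs (some start) (some j))).1
      = (((PySem.List.pyRange j (cs.length : Int) 1).filter
            (bBoundary cs (cs.length : Int))).foldl (bStep cs) (ik, start)).1 := by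
  intro d
  induction d with
  | zero =>
    intro j h0 hn hd start ik hs0 hsj hnc
    have hj : j = (cs.length : Int) := by omega
    rw [hj, PySem.List.pyRange_one_eq_nil le_rfl]
    simp
  | succ d ih =>
    intro j h0 hn hd start ik hs0 hsj hnc
    have hj : j < (cs.length : Int) := by omega
    rw [PySem.List.pyRange_one_cons hj]
    by_cases hc : PySem.List.pyGetD cs j ' ' = ':'
    · rw [List.foldl_cons, aStep_colon cs _ _ j hc,
          List.filter_cons_of_pos (bBoundary_true cs _ j (Or.inl hc)),
          List.foldl_cons, bStep_colon cs _ j hc]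
      rw [← slice_empty cs (j + 1) (by omega)]
      exact ih (j + 1) (by omega) (by omega) (by omega) (j + 1) _ (by omega) le_rfl
        (by intro k hk hk'; omega)
    · by_cases hb : j = (cs.length : Int) - 4
      · rw [List.foldl_cons, aStep_last cs _ _ j hc hb,
            List.filter_cons_of_pos (bBoundary_true cs _ j (Or.inr hb)),
            List.foldl_cons, bStep_last cs _ j hc]
        rw [← slice_snoc cs start j hs0 hsj hj, ← slice_empty cs (j + 1) (by omega)]
        exact ih (j + 1) (by omega) (by omega) (by omega) (j + 1) _ (by omega) le_rfl
          (by intro k hk hk'; omega)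
      · rw [List.foldl_cons, aStep_mid cs _ _ j hc hb,
            List.filter_cons_of_neg (by simp [bBoundary_false cs _ j hc hb]),
            ← slice_snoc cs start j hs0 hsj hj]
        exact ih (j + 1) (by omega) (by omega) (by omega) start _ hs0 (by omega)
          (by intro k hk hk'
              by_cases hkj : k = j
              · rw [hkj]; exact hc
              · exact hnc k hk (by omega))

-- ===== VERDICT (by name: the statement is the Claim_ definition above) =====
theorem call_help1_spec : Claim_equal_call_help1 := by
  intro l _
  unfold Spec_call_help1 call_help1 call_help1_alt
  have h := main_inv l.toList ((l.toList.length : Int) - 0).toNat 0 le_rfl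
    (Int.natCast_nonneg _) rfl 0 [] le_rfl le_rfl (by intro k hk hk'; omega)
  rw [slice_empty l.toList 0 le_rfl] at h
  simp only [h]
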